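-- pv_equiv track=rewrite | github.com/nomadmtb/faa-obstacle-data | faaobstacles/dof/views.py | __validate_codes
-- ===== SOURCE A (Python) =====
-- def __validate_codes(raw_route):
--
--     codes = raw_route.split(',')
--     codes = [code.upper().lstrip().rstrip() for code in codes]
--
--     # we also want to remove two airport codes that appear next to eachother.
--     for i in range(len(codes) - 1):
--         if codes[i] == codes[i+1]:
--             codes[i] = None
--
--     codes = [c for c in codes if c]
--
--     return codes[:5]
-- ===== SOURCE B (Python) =====
-- def __validate_codes(raw_route):
--     # Single streaming pass: normalize each piece, collapse consecutive
--     # duplicates by tracking the previous normalized value, keep at most 5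
--     # non-empty representatives.
--     result = []
--     prev = None
--     for part in raw_route.split(','):
--         code = part.upper().strip()
--         if code != prev:
--             prev = code
--             if code and len(result) < 5:
--                 result.append(code)
--     return result
-- ===== Notes on version B (the rewrite author's own statement) =====
-- stated objective: simpler
-- what changed: Replaces the three-pass pipeline (normalize list, index loop mutating earlier duplicates to None, filter + slice) by one streaming pass that tracks the previous normalized code and appends at most 5 non-empty run representatives.
import Mathlib
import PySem

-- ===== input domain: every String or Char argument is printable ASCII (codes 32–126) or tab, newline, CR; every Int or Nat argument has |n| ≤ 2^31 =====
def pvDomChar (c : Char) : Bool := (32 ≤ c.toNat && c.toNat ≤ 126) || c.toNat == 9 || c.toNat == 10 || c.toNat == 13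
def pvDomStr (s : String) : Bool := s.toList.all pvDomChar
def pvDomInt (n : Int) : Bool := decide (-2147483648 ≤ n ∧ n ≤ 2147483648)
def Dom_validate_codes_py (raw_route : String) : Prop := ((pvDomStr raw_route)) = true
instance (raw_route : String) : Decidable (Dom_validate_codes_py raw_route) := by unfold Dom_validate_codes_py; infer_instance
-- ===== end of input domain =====

-- B replaces A's three-pass pipeline (normalize, index loop None-ing earlier duplicates, filter + slice)
-- by one streaming pass tracking the previous normalized code; objective: simpler.


-- ===== PORT A =====
def validate_codes_py (raw_route : String) : List String :=
  -- codes = raw_route.split(',')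
  let codes := (PySem.Str.split? raw_route ",").getD []
  -- codes = [code.upper().lstrip().rstrip() for code in codes]
  let codes := codes.map (fun code => PySem.Str.rstrip (PySem.Str.lstrip (PySem.Str.upper code)))
  -- the list now holds str-or-None values; model as List (Option String)
  let codesO : List (Option String) := codes.map some
  -- for i in range(len(codes) - 1): if codes[i] == codes[i+1]: codes[i] = None
  let codesM := (PySem.List.pyRange 0 ((codesO.length : Int) - 1) 1).foldl
      (fun cs i =>
        if PySem.List.pyGetD cs i none = PySem.List.pyGetD cs (i + 1) none
        then cs.set i.toNat none else cs) codesO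
  -- codes = [c for c in codes if c]
  let kept := codesM.filterMap (fun c => c.bind (fun s => if s = "" then none else some s))
  -- return codes[:5]
  PySem.List.slice kept none (some 5)

-- ===== PORT B =====
def validate_codes_py_alt (raw_route : String) : List String :=
  -- one pass: result = [], prev = None; for part in raw_route.split(','): …
  (((PySem.Str.split? raw_route ",").getD []).foldl
    (fun (st : List String × Option String) part =>
      let code := PySem.Str.strip (PySem.Str.upper part)
      if st.2 ≠ some code then
        (if code ≠ "" ∧ st.1.length < 5 then st.1 ++ [code] else st.1, some code)
      else st)
    ([], none)).1

-- ===== PRECONDITION & SPEC =====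
def Spec_validate_codes_py (raw_route : String) (out : List String) : Prop := out = validate_codes_py_alt raw_route
instance (raw_route : String) (out : List String) : Decidable (Spec_validate_codes_py raw_route out) := by unfold Spec_validate_codes_py; infer_instance

-- ===== CLAIM (what is proved, stated in full; the proofs are below) =====
def Claim_equal_validate_codes_py : Prop := ∀ (raw_route : String), Dom_validate_codes_py raw_route → Spec_validate_codes_py raw_route (validate_codes_py raw_route)

-- ===== LEMMAS AND PROOFS =====

-- canonical middle form: one representative per run of equal consecutive codes
def pvCollapse : Option String → List String → List String
  | _, [] => []
  | prev, a :: t => if some a = prev then pvCollapse prev t else a :: pvCollapse (some a) t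

-- A's marking loop, written structurally: earlier element of an equal pair becomes none
def pvMarked : List String → List (Option String)
  | [] => []
  | [a] => [some a]
  | a :: b :: t => (if a = b then none else some a) :: pvMarked (b :: t)

-- A's loop body, on Nat indices
def pvStepA (cs : List (Option String)) (j : Nat) : List (Option String) :=
  if cs.getD j none = cs.getD (j + 1) none then cs.set j none else cs

-- entry j of the fully marked list, index form
def pvEntry (cs : List String) (j : Nat) : Option String :=
  if cs.getD j "" = cs.getD (j + 1) "" then none else some (cs.getD j "")

def pvMarkPrefix (cs : List String) (k : Nat) : List (Option String) :=
  ((List.range k).map (pvEntry cs)) ++ (cs.drop k).map some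

def pvFilt (l : List (Option String)) : List String :=
  l.filterMap (fun c => c.bind (fun s => if s = "" then none else some s))

def pvKeep (cs : List String) : List String :=
  (pvCollapse none cs).filter (fun c => decide (c ≠ ""))

theorem pv_strip_eq (s : String) :
    PySem.Str.rstrip (PySem.Str.lstrip s) = PySem.Str.strip s := by
  simp [PySem.Str.strip, PySem.Str.rstrip, PySem.Str.lstrip,
        PySem.Chars.strip, PySem.Chars.lstrip, PySem.Chars.rstrip]

-- the index loop, processed up to k, equals the marked prefix
theorem pv_fold_markPrefix (cs : List String) (k : Nat) (hk : k + 1 ≤ cs.length) :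
    (List.range k).foldl pvStepA (cs.map some) = pvMarkPrefix cs k := by
  induction k with
  | zero => simp [pvMarkPrefix]
  | succ k ih =>
    have hk' : k + 1 ≤ cs.length := by omega
    rw [List.range_succ, List.foldl_append, ih hk']
    have hlen : ((List.range k).map (pvEntry cs)).length = k := by simp
    have hd0 : (cs.drop k)[0]? = cs[k]? := by
      rw [List.getElem?_drop]; simp
    have hd1 : (cs.drop k)[1]? = cs[k + 1]? := by
      rw [List.getElem?_drop]
    have hget0 : (pvMarkPrefix cs k).getD k none = cs[k]? := by
      unfold pvMarkPrefix
      rw [List.getD, List.getElem?_append_right (by omega), hlen]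
      simp only [Nat.sub_self]
      rw [show ((cs.drop k).map some)[0]? = ((cs.drop k)[0]?).map some by simp,
          hd0]
      cases cs[k]? <;> simp
    have hget1 : (pvMarkPrefix cs k).getD (k + 1) none = cs[k + 1]? := by
      unfold pvMarkPrefix
      rw [List.getD, List.getElem?_append_right (by omega), hlen]
      simp only [Nat.add_sub_cancel_left]
      rw [show ((cs.drop k).map some)[1]? = ((cs.drop k)[1]?).map some by simp,
          hd1]
      cases cs[k + 1]? <;> simp
    have hck : cs[k]? = some (cs.getD k "") := by
      rw [List.getD, List.getElem?_eq_getElem (by omega)]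
      simp
    have hck1 : cs[k + 1]? = some (cs.getD (k + 1) "") := by
      rw [List.getD, List.getElem?_eq_getElem (by omega)]
      simp
    have hdropcons : cs.drop k = cs.getD k "" :: cs.drop (k + 1) := by
      rw [List.drop_eq_getElem_cons (by omega : k < cs.length)]
      rw [List.getD_eq_getElem _ _ (by omega : k < cs.length)]
    simp only [List.foldl_cons, List.foldl_nil, pvStepA, hget0, hget1, hck, hck1]
    unfold pvMarkPrefix
    rw [List.range_succ, List.map_append]
    by_cases h : cs.getD k "" = cs.getD (k + 1) ""
    · have hE : cs[k]?.getD "" = cs[k + 1]?.getD "" := by rw [hck, hck1]; exact h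
      simp only [h]
      rw [List.set_append]
      simp only [hlen, lt_irrefl, Nat.sub_self]
      rw [hdropcons]
      simp [pvEntry, hE, List.append_assoc]
    · have hE : ¬ cs[k]?.getD "" = cs[k + 1]?.getD "" := by rw [hck, hck1]; exact h
      rw [if_neg (by simpa using h)]
      rw [hdropcons]
      simp [pvEntry, hE, List.append_assoc]

-- the marked prefix at length-1 is the structural marked list
theorem pv_marked_eq_markPrefix (cs : List String) (h : cs ≠ []) :
    pvMarked cs = pvMarkPrefix cs (cs.length - 1) := by
  induction cs with
  | nil => simp at h
  | cons a t ih =>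
    cases t with
    | nil => simp [pvMarked, pvMarkPrefix]
    | cons b t' =>
      have ih' := ih (by simp)
      simp only [List.length_cons, Nat.add_sub_cancel] at ih' ⊢
      rw [show pvMarked (a :: b :: t') = (if a = b then none else some a) :: pvMarked (b :: t') from rfl,
          ih']
      unfold pvMarkPrefix
      rw [List.range_succ_eq_map, List.map_cons, List.map_map]
      have hmap : (List.range t'.length).map (pvEntry (a :: b :: t') ∘ Nat.succ)
          = (List.range t'.length).map (pvEntry (b :: t')) := by
        apply List.map_congr_left
        intro j _
        simp [pvEntry]
      rw [hmap]
      simp [pvEntry, List.getD]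

-- the filtered marked list equals the filtered collapse: one value per run survives in order
theorem pv_filt_marked (cs : List String) :
    pvFilt (pvMarked cs) = pvKeep cs := by
  induction cs with
  | nil => simp [pvMarked, pvFilt, pvKeep, pvCollapse]
  | cons a t ih =>
    cases t with
    | nil =>
      simp only [pvMarked, pvFilt, pvKeep, pvCollapse, List.filterMap]
      by_cases h : a = "" <;> simp [h]
    | cons b t' =>
      have key : pvFilt (pvMarked (b :: t')) = pvKeep (b :: t') := ih
      by_cases hab : a = b
      · -- a is dropped on both sides; the run continues with b
        have hA : pvFilt (pvMarked (a :: b :: t')) = pvFilt (pvMarked (b :: t')) := by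
          simp [pvMarked, pvFilt, hab]
        rw [hA, key]
        unfold pvKeep
        subst hab
        simp [pvCollapse]
      · have hba : ¬ (some b = some a) := by simpa using fun h => hab h.symm
        have hcBt : pvCollapse none (b :: t') = b :: pvCollapse (some b) t' := by
          simp [pvCollapse]
        have hcA : pvCollapse none (a :: b :: t') = a :: b :: pvCollapse (some b) t' := by
          simp [pvCollapse, hba]
        have hA : pvFilt (pvMarked (a :: b :: t'))
            = pvFilt [some a] ++ pvFilt (pvMarked (b :: t')) := by
          by_cases ha : a = "" <;> simp [pvMarked, pvFilt, hab, ha]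
        rw [hA, key]
        unfold pvKeep
        rw [hcA, hcBt]
        by_cases ha : a = "" <;> simp [pvFilt, ha]

-- B's loop body
def pvStepB (st : List String × Option String) (part : String) : List String × Option String :=
  let code := PySem.Str.strip (PySem.Str.upper part)
  if st.2 ≠ some code then
    (if code ≠ "" ∧ st.1.length < 5 then st.1 ++ [code] else st.1, some code)
  else st

-- B's streaming fold computes acc ++ (capped tail of the filtered collapse)
theorem pv_foldB (parts : List String) :
    ∀ (acc : List String) (prev : Option String), acc.length ≤ 5 →
    (parts.foldl pvStepB (acc, prev)).1
      = acc ++ ((pvCollapse prev (parts.map (fun p => PySem.Str.strip (PySem.Str.upper p)))).filter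
          (fun c => decide (c ≠ ""))).take (5 - acc.length) := by
  induction parts with
  | nil => intro acc prev _; simp [pvCollapse]
  | cons p t ih =>
    intro acc prev hacc
    simp only [List.foldl_cons, List.map_cons, pvCollapse]
    by_cases hprev : prev = some (PySem.Str.strip (PySem.Str.upper p))
    · rw [show pvStepB (acc, prev) p = (acc, prev) by simp [pvStepB, hprev]]
      rw [if_pos hprev.symm, ih acc prev hacc, hprev]
    · rw [if_neg (fun h => hprev h.symm)]
      by_cases hne : PySem.Str.strip (PySem.Str.upper p) = ""
      · rw [show pvStepB (acc, prev) p = (acc, some (PySem.Str.strip (PySem.Str.upper p))) by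
          simp [pvStepB, hne]]
        rw [ih acc _ hacc]
        simp [hne]
      · by_cases hlt : acc.length < 5
        · rw [show pvStepB (acc, prev) p
              = (acc ++ [PySem.Str.strip (PySem.Str.upper p)],
                 some (PySem.Str.strip (PySem.Str.upper p))) by
            simp [pvStepB, hprev, hne, hlt]]
          rw [ih _ _ (by simp; omega)]
          simp only [List.length_append, List.length_cons, List.length_nil, Nat.zero_add]
          rw [List.filter_cons_of_pos (by simpa using hne)]
          rw [show (5 - acc.length) = (5 - (acc.length + 1)) + 1 by omega]
          rw [List.take_succ_cons]
          simp [List.append_assoc]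
        · rw [show pvStepB (acc, prev) p = (acc, some (PySem.Str.strip (PySem.Str.upper p))) by
            simp [pvStepB, hprev, hne, hlt]]
          rw [ih acc _ hacc]
          have h5 : acc.length = 5 := by omega
          simp [h5]

-- ===== VERDICT (by name: the statement is the Claim_ definition above) =====
theorem validate_codes_py_spec : Claim_equal_validate_codes_py := by
  intro raw_route _
  unfold Spec_validate_codes_py validate_codes_py validate_codes_py_alt
  set parts := (PySem.Str.split? raw_route ",").getD [] with hparts
  simp only
  set cs := parts.map (fun code => PySem.Str.rstrip (PySem.Str.lstrip (PySem.Str.upper code))) with hcs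
  have hcs' : cs = parts.map (fun p => PySem.Str.strip (PySem.Str.upper p)) := by
    rw [hcs]; apply List.map_congr_left; intro p _; exact pv_strip_eq _
  -- B side
  have hB : ((parts.foldl pvStepB ([], none)).1 : List String)
      = ((pvCollapse none cs).filter (fun c => decide (c ≠ ""))).take 5 := by
    rw [pv_foldB parts [] none (by simp)]
    simp [hcs']
  rw [show (parts.foldl
      (fun (st : List String × Option String) part =>
        let code := PySem.Str.strip (PySem.Str.upper part)
        if st.2 ≠ some code then
          (if code ≠ "" ∧ st.1.length < 5 then st.1 ++ [code] else st.1, some code)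
        else st) ([], none)) = parts.foldl pvStepB ([], none) from rfl, hB]
  -- A side
  rw [PySem.List.slice_to _ (by norm_num)]
  norm_num
  -- the marking loop
  have hmark : ((PySem.List.pyRange 0 ((cs.length : Int) - 1) 1).foldl
      (fun cs i =>
        if PySem.List.pyGetD cs i none = PySem.List.pyGetD cs (i + 1) none
        then cs.set i.toNat none else cs) (cs.map some)) = pvMarked cs := by
    cases cs with
    | nil => rfl
    | cons a t =>
      have hlen : ((((a :: t).length : Nat) : Int) - 1) = ((t.length : Nat) : Int) := by
        simp
      rw [hlen, PySem.List.pyRange_zero_natCast, List.foldl_map]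
      have hfold : ∀ (st : List (Option String)) (j : Nat),
          (if PySem.List.pyGetD st ((j : Nat) : Int) none
              = PySem.List.pyGetD st (((j : Nat) : Int) + 1) none
           then st.set ((j : Nat) : Int).toNat none else st) = pvStepA st j := by
        intro st j
        rw [show (((j : Nat) : Int) + 1) = (((j + 1 : Nat) : Nat) : Int) by push_cast; ring]
        rw [PySem.List.pyGetD_natCast, PySem.List.pyGetD_natCast]
        simp [pvStepA]
      simp only [hfold]
      rw [pv_fold_markPrefix (a :: t) t.length (by simp),
          pv_marked_eq_markPrefix (a :: t) (by simp)]
      have hl : (a :: t).length - 1 = t.length := by simp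
      rw [hl]
  rw [hmark]
  have hfm := pv_filt_marked cs
  unfold pvFilt pvKeep at hfm
  rw [hfm]
  norm_num
  rw [show Int.toNat 5 = 5 from rfl]
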